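-- pv_equiv track=rewrite | github.com/aviswerdlow/k4 | experiments/internal_push/scripts/tokenize_v21.py | get_head_tokens
-- ===== SOURCE A (Python) =====
-- def get_head_tokens(tokens, text_length=97, head_boundary=74):
--     """Extract tokens that belong to the head window [0..74]."""
--     head_tokens = []
--     pos = 0
--
--     for token in tokens:
--         token_start = pos
--         token_end = pos + len(token)
--
--         # Include token if it starts within head window
--         if token_start <= head_boundary:
--             head_tokens.append(token)
--
--             # Special case for v2.1: if token is 'JOY' at position 77-79, exclude it
--             if token == 'JOY' and token_start == 77:
--                 head_tokens.pop()  # Remove 'JOY' as it's outside head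
--
--         pos = token_end
--
--     return head_tokens
-- ===== SOURCE B (Python) =====
-- def get_head_tokens(tokens, text_length=97, head_boundary=74):
--     """Back-to-front: take the total length, then walk the tokens in reverse,
--     recovering each token's start by subtracting its length from the running
--     end; collect the qualifying tokens backwards and reverse once at the end
--     (keeping the documented 'JOY at 77' exclusion)."""
--     out = []
--     end = sum(map(len, tokens))
--     for t in reversed(tokens):
--         start = end - len(t)
--         if start <= head_boundary and not (t == 'JOY' and start == 77):
--             out.append(t)
--         end = start
--     out.reverse()
--     return out
-- ===== Notes on version B (the rewrite author's own statement) =====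
-- stated objective: alternative
-- what changed: Replaces A's forward running-position scan with append-then-conditional-pop by a reverse traversal: total length is computed once, then tokens are walked back-to-front, each start recovered by subtracting lengths from the running end, the output built backwards and reversed once (keeping the documented 'JOY at 77' exclusion as a single keep-condition).
import Mathlib
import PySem

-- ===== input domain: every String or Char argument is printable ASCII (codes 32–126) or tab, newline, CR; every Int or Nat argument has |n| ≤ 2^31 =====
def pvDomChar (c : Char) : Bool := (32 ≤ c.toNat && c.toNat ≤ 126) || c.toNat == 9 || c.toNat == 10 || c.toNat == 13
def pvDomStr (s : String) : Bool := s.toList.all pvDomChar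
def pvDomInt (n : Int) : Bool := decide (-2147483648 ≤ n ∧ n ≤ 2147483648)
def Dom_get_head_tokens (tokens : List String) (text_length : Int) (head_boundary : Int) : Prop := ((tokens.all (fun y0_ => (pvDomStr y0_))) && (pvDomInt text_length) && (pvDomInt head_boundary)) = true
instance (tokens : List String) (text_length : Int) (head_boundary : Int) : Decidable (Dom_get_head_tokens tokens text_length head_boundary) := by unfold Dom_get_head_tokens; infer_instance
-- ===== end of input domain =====

-- B replaces A's forward running-position scan (append then conditional pop) by a reverse
-- traversal from the total length, building the output back-to-front (objective: alternative).


-- ===== PORT A =====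
-- state = (head_tokens, pos); 'head_tokens.pop()' right after the append removes the
-- just-appended element of a nonempty list, i.e. dropLast (exact here).
def get_head_tokens (tokens : List String) (text_length : Int) (head_boundary : Int) : List String :=
  (tokens.foldl (fun (st : List String × Int) token =>
      let token_start := st.2
      let token_end := st.2 + PySem.Str.len token
      let head_tokens :=
        if token_start ≤ head_boundary then
          let h := st.1 ++ [token]
          if token == "JOY" && token_start == (77 : Int) then h.dropLast else h
        else st.1
      (head_tokens, token_end)) ([], 0)).1

-- ===== PORT B =====
-- sum(map(len, tokens)); for t in reversed(tokens); out.append; out.reverse()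
def get_head_tokens_alt (tokens : List String) (text_length : Int) (head_boundary : Int) : List String :=
  let total := tokens.foldl (fun a t => a + PySem.Str.len t) 0
  ((tokens.reverse.foldl (fun (st : List String × Int) t =>
      let start := st.2 - PySem.Str.len t
      let out := if start ≤ head_boundary && !(t == "JOY" && start == (77 : Int)) then st.1 ++ [t] else st.1
      (out, start)) ([], total)).1).reverse

-- ===== PRECONDITION & SPEC =====
def Spec_get_head_tokens (tokens : List String) (text_length : Int) (head_boundary : Int) (out : List String) : Prop := out = get_head_tokens_alt tokens text_length head_boundary
instance (tokens : List String) (text_length : Int) (head_boundary : Int) (out : List String) : Decidable (Spec_get_head_tokens tokens text_length head_boundary out) := by unfold Spec_get_head_tokens; infer_instance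

-- ===== CLAIM (what is proved, stated in full; the proofs are below) =====
def Claim_equal_get_head_tokens : Prop := ∀ (tokens : List String) (text_length : Int) (head_boundary : Int), Dom_get_head_tokens tokens text_length head_boundary → Spec_get_head_tokens tokens text_length head_boundary (get_head_tokens tokens text_length head_boundary)

-- ===== LEMMAS AND PROOFS =====

-- common recursive characterisation: tokens processed forward from start offset p
def ghtRec (hb : Int) : List String → Int → List String
  | [], _ => []
  | t :: ts, p =>
      if p ≤ hb then
        (if t == "JOY" && p == (77 : Int) then [] else [t]) ++ ghtRec hb ts (p + PySem.Str.len t)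
      else ghtRec hb ts (p + PySem.Str.len t)

def ghtSum : List String → Int
  | [] => 0
  | t :: ts => PySem.Str.len t + ghtSum ts

theorem ghtA_fold (hb : Int) (tokens : List String) :
    ∀ (acc : List String) (p : Int),
      (tokens.foldl (fun (st : List String × Int) token =>
        let token_start := st.2
        let token_end := st.2 + PySem.Str.len token
        let head_tokens :=
          if token_start ≤ hb then
            let h := st.1 ++ [token]
            if token == "JOY" && token_start == (77 : Int) then h.dropLast else h
          else st.1
        (head_tokens, token_end)) (acc, p)).1 = acc ++ ghtRec hb tokens p := by
  induction tokens with
  | nil => intro acc p; simp [ghtRec]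
  | cons t ts ih =>
      intro acc p
      simp only [List.foldl_cons, ghtRec]
      by_cases hp : p ≤ hb
      · by_cases hj : (t == "JOY" && p == (77 : Int)) = true
        · simpa [hp, hj, List.dropLast_concat] using ih acc (p + PySem.Str.len t)
        · simpa [hp, hj, List.append_assoc] using ih (acc ++ [t]) (p + PySem.Str.len t)
      · simpa [hp] using ih acc (p + PySem.Str.len t)

theorem ghtA_eq (tokens : List String) (tl hb : Int) :
    get_head_tokens tokens tl hb = ghtRec hb tokens 0 := by
  unfold get_head_tokens
  simpa using ghtA_fold hb tokens [] 0

theorem ghtSum_fold (tokens : List String) :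
    ∀ a : Int, tokens.foldl (fun a t => a + PySem.Str.len t) a = a + ghtSum tokens := by
  induction tokens with
  | nil => intro a; simp [ghtSum]
  | cons t ts ih => intro a; simp only [List.foldl_cons, ghtSum, ih]; ring

-- the reverse fold, seen via foldr: from end offset p + ghtSum l it produces
-- (ghtRec … p).reverse prefixed to the accumulator, and the running end comes back as p
theorem ghtB_foldr (hb : Int) (l : List String) :
    ∀ (acc : List String) (p : Int),
      l.foldr (fun t (st : List String × Int) =>
        let start := st.2 - PySem.Str.len t
        let out := if start ≤ hb && !(t == "JOY" && start == (77 : Int)) then st.1 ++ [t] else st.1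
        (out, start)) (acc, p + ghtSum l)
      = (acc ++ (ghtRec hb l p).reverse, p) := by
  induction l with
  | nil => intro acc p; simp [ghtSum, ghtRec]
  | cons t ts ih =>
      intro acc p
      have hts : p + ghtSum (t :: ts) = (p + PySem.Str.len t) + ghtSum ts := by
        simp [ghtSum]; ring
      simp only [List.foldr_cons, hts, ih acc (p + PySem.Str.len t)]
      have hstart : (p + PySem.Str.len t) - PySem.Str.len t = p := by ring
      simp only [hstart, ghtRec]
      by_cases hp : p ≤ hb
      · by_cases hj : (t == "JOY" && p == (77 : Int)) = true
        · simp [hp, hj]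
        · simp [hp, hj, List.append_assoc]
      · simp [hp]

theorem ghtB_eq (tokens : List String) (tl hb : Int) :
    get_head_tokens_alt tokens tl hb = ghtRec hb tokens 0 := by
  unfold get_head_tokens_alt
  simp only [List.foldl_reverse, ghtSum_fold tokens 0, ghtB_foldr hb tokens [] 0]
  simp

-- ===== VERDICT (by name: the statement is the Claim_ definition above) =====
theorem get_head_tokens_spec : Claim_equal_get_head_tokens := by
  intro tokens tl hb _
  unfold Spec_get_head_tokens
  rw [ghtA_eq, ghtB_eq]
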